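-- pv_equiv track=rewrite | github.com/matthewnbrown/roc-cluster | api/job_manager.py | _summarize_purchase_armory_results
-- ===== SOURCE A (Python) =====
-- from typing import List, Dict, Any, Optional
--
-- def _summarize_purchase_armory_results(successful_results: List[Dict]) -> Dict[str, Any]:
--     """Summarize purchase armory action results"""
--     summary = {
--         "weapons_purchased": 0,
--         "purchases_successful": 0,
--         "purchases_failed": 0,
--         "total_cost": 0,
--         "weapons_sold": 0,
--         "total_revenue": 0,
--         "total_retries": 0
--     }
--
--     for result in successful_results:
--         result_data = result.get("result", {})
--         if isinstance(result_data, dict):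
--             summary["total_retries"] += result_data.get("retries", 0)
--             if result_data.get("success"):
--                 summary["purchases_successful"] += 1
--                 summary["weapons_purchased"] += result_data.get("weapons_purchased", 0)
--                 summary["total_cost"] += result_data.get("cost", 0)
--                 summary["weapons_sold"] += result_data.get("weapons_sold", 0)
--                 summary["total_revenue"] += result_data.get("revenue", 0)
--             else:
--                 summary["purchases_failed"] += 1
--
--     return summary
-- ===== SOURCE B (Python) =====
-- def _summarize_purchase_armory_results(successful_results):
--     """Summarize purchase armory action results (independent aggregations)."""
--     dict_results = [rd for rd in (r.get("result", {}) for r in successful_results)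
--                     if isinstance(rd, dict)]
--     successful = [rd for rd in dict_results if rd.get("success")]
--     failed = [rd for rd in dict_results if not rd.get("success")]
--     return {
--         "weapons_purchased": sum(rd.get("weapons_purchased", 0) for rd in successful),
--         "purchases_successful": len(successful),
--         "purchases_failed": len(failed),
--         "total_cost": sum(rd.get("cost", 0) for rd in successful),
--         "weapons_sold": sum(rd.get("weapons_sold", 0) for rd in successful),
--         "total_revenue": sum(rd.get("revenue", 0) for rd in successful),
--         "total_retries": sum(rd.get("retries", 0) for rd in dict_results),
--     }
-- ===== Notes on version B (the rewrite author's own statement) =====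
-- stated objective: simpler
-- what changed: Replaces A's single loop with a seven-field mutable accumulator by three list projections (dict results, successful, failed) and seven independent len/sum aggregations, one per summary field.
import Mathlib
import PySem

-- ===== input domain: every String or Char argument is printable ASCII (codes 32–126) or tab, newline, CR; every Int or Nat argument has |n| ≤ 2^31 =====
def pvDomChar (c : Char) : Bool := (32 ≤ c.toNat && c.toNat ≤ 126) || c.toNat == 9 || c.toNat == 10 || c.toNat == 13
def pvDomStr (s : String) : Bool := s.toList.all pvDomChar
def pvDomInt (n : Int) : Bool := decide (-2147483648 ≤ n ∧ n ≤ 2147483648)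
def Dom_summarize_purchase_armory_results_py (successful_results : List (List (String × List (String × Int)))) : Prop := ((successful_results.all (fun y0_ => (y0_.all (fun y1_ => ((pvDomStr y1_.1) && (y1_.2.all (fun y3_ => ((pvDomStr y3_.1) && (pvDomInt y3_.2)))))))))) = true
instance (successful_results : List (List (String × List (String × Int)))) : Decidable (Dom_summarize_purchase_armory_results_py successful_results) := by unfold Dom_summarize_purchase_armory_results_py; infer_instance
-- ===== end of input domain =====

-- B replaces A's one accumulating loop by independent filter/len/sum aggregations per summary field (objective: simpler).


-- ===== PORT A =====
def pvGetD (xs : List (String × Int)) (k : String) : Int :=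
  (PySem.Dict.mk xs).getD k 0

-- result.get("result", {})
def pvRd (r : List (String × List (String × Int))) : List (String × Int) :=
  (PySem.Dict.mk r).getD "result" []

-- rd.get("success") is truthy iff the key is present with a nonzero value (None is falsy)
def pvSucc (xs : List (String × Int)) : Bool :=
  match (PySem.Dict.mk xs).get? "success" with
  | some v => decide (v ≠ 0)
  | none => false

-- Under the type convention result["result"] is always a dict, so A's `isinstance(result_data, dict)` test is always true.
-- A's summary dict has seven fixed keys, ported as a 7-tuple accumulator in the dict's insertion order.
def summarize_purchase_armory_results_py (successful_results : List (List (String × List (String × Int)))) : List (String × Int) :=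
  let s := successful_results.foldl
    (fun (s : Int × Int × Int × Int × Int × Int × Int) r =>
      let rd := pvRd r
      let (wp, ps, pf, tc, ws, rev, tr) := s
      let tr := tr + pvGetD rd "retries"
      if pvSucc rd then
        (wp + pvGetD rd "weapons_purchased", ps + 1, pf,
         tc + pvGetD rd "cost", ws + pvGetD rd "weapons_sold",
         rev + pvGetD rd "revenue", tr)
      else
        (wp, ps, pf + 1, tc, ws, rev, tr))
    (0, 0, 0, 0, 0, 0, 0)
  [("weapons_purchased", s.1), ("purchases_successful", s.2.1),
   ("purchases_failed", s.2.2.1), ("total_cost", s.2.2.2.1),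
   ("weapons_sold", s.2.2.2.2.1), ("total_revenue", s.2.2.2.2.2.1),
   ("total_retries", s.2.2.2.2.2.2)]

-- ===== PORT B =====
def pvSumKey (l : List (List (String × Int))) (k : String) : Int :=
  (l.map (fun rd => pvGetD rd k)).sum

def summarize_purchase_armory_results_py_alt (successful_results : List (List (String × List (String × Int)))) : List (String × Int) :=
  let dictResults := successful_results.map pvRd
  let successful := dictResults.filter pvSucc
  let failed := dictResults.filter (fun rd => !pvSucc rd)
  [("weapons_purchased", pvSumKey successful "weapons_purchased"),
   ("purchases_successful", (successful.length : Int)),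
   ("purchases_failed", (failed.length : Int)),
   ("total_cost", pvSumKey successful "cost"),
   ("weapons_sold", pvSumKey successful "weapons_sold"),
   ("total_revenue", pvSumKey successful "revenue"),
   ("total_retries", pvSumKey dictResults "retries")]

-- ===== PRECONDITION & SPEC =====
def Spec_summarize_purchase_armory_results_py (successful_results : List (List (String × List (String × Int)))) (out : List (String × Int)) : Prop := out = summarize_purchase_armory_results_py_alt successful_results
instance (successful_results : List (List (String × List (String × Int)))) (out : List (String × Int)) : Decidable (Spec_summarize_purchase_armory_results_py successful_results out) := by unfold Spec_summarize_purchase_armory_results_py; infer_instance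

-- ===== CLAIM (what is proved, stated in full; the proofs are below) =====
def Claim_equal_summarize_purchase_armory_results_py : Prop := ∀ (successful_results : List (List (String × List (String × Int)))), Dom_summarize_purchase_armory_results_py successful_results → Spec_summarize_purchase_armory_results_py successful_results (summarize_purchase_armory_results_py successful_results)

-- ===== LEMMAS AND PROOFS =====

lemma pv_fold_key (l : List (List (String × List (String × Int)))) (a b c d e f g : Int) :
    l.foldl
      (fun (s : Int × Int × Int × Int × Int × Int × Int) r =>
        let rd := pvRd r
        let (wp, ps, pf, tc, ws, rev, tr) := s
        let tr := tr + pvGetD rd "retries"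
        if pvSucc rd then
          (wp + pvGetD rd "weapons_purchased", ps + 1, pf,
           tc + pvGetD rd "cost", ws + pvGetD rd "weapons_sold",
           rev + pvGetD rd "revenue", tr)
        else
          (wp, ps, pf + 1, tc, ws, rev, tr))
      (a, b, c, d, e, f, g) =
    (a + pvSumKey ((l.map pvRd).filter pvSucc) "weapons_purchased",
     b + (((l.map pvRd).filter pvSucc).length : Int),
     c + (((l.map pvRd).filter (fun rd => !pvSucc rd)).length : Int),
     d + pvSumKey ((l.map pvRd).filter pvSucc) "cost",
     e + pvSumKey ((l.map pvRd).filter pvSucc) "weapons_sold",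
     f + pvSumKey ((l.map pvRd).filter pvSucc) "revenue",
     g + pvSumKey (l.map pvRd) "retries") := by
  induction l generalizing a b c d e f g with
  | nil => simp [pvSumKey]
  | cons hd tl ih =>
    by_cases h : pvSucc (pvRd hd) = true <;>
      simp [h, ih, pvSumKey, Prod.ext_iff] <;>
      and_intros <;> omega

-- ===== VERDICT (by name: the statement is the Claim_ definition above) =====
theorem summarize_purchase_armory_results_py_spec : Claim_equal_summarize_purchase_armory_results_py := by
  intro srs _
  unfold Spec_summarize_purchase_armory_results_py
  unfold summarize_purchase_armory_results_py summarize_purchase_armory_results_py_alt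
  rw [pv_fold_key]
  simp
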